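-- pv_equiv track=rewrite | github.com/briantoanle/Coding-Office-Hours | almostIncreasingSequence.py | solution
-- ===== SOURCE A (Python) =====
-- def solution(sequence):
--     counter = 0
--     for i in range(len(sequence)):
--         temp = sequence.copy()
--         temp.pop(i)
--         if temp == sorted(temp):
--             l = []
--             for i in range(len(temp)):
--                 if temp[i] not in l:
--                     l.append(temp[i])
--             if temp == l:
--                 return True
--     return False
-- ===== SOURCE B (Python) =====
-- def solution(sequence):
--     n = len(sequence)
--     if n == 0:
--         return False
--     j = next((k for k in range(n - 1) if sequence[k] >= sequence[k + 1]), None)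
--     if j is None:
--         return True
--
--     def inc(xs):
--         return all(x < y for x, y in zip(xs, xs[1:]))
--
--     return inc(sequence[:j] + sequence[j + 1:]) or inc(sequence[:j + 1] + sequence[j + 2:])
-- ===== Notes on version B (the rewrite author's own statement) =====
-- stated objective: faster
-- what changed: Instead of trying every removal and sorting+dedup-checking each n-element copy, B does one linear scan to find the first adjacent violation and tests only the two candidate removals with an O(n) strict-increase check.
import Mathlib
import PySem

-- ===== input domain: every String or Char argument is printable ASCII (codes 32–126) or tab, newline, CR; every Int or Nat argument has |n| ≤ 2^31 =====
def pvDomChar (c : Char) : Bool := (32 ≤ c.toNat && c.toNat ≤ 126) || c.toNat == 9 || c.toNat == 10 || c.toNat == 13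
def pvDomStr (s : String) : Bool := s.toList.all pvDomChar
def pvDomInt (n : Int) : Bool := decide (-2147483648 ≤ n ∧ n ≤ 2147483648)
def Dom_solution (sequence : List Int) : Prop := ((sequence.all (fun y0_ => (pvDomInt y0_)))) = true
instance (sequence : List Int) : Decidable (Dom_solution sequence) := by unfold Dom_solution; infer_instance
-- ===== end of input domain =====

-- B replaces A's try-every-removal O(n^2 log n) search by a single linear scan:
-- find the first adjacent violation and test only the two candidate removals (objective: faster).


-- ===== PORT A =====
-- A's inner loop: build the list l of first occurrences of temp
def solutionDedup (temp : List Int) : List Int :=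
  temp.foldl (fun l x => if l.contains x then l else l ++ [x]) []

def solution (sequence : List Int) : Bool :=
  (List.range sequence.length).any (fun i =>
    let temp := sequence.eraseIdx i
    temp == PySem.List.sorted temp (fun x => x) false && temp == solutionDedup temp)

-- ===== PORT B =====
-- Source B's inc: all(x < y for x, y in zip(xs, xs[1:]))
def solutionInc (xs : List Int) : Bool :=
  (xs.zip (xs.drop 1)).all (fun p => decide (p.1 < p.2))

def solution_alt (sequence : List Int) : Bool :=
  let n := sequence.length
  if n = 0 then false
  else
    match (List.range (n - 1)).find?
        (fun k => decide (sequence.getD (k + 1) 0 ≤ sequence.getD k 0)) with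
    | none => true
    | some j =>
        solutionInc (sequence.take j ++ sequence.drop (j + 1)) ||
        solutionInc (sequence.take (j + 1) ++ sequence.drop (j + 2))

-- ===== PRECONDITION & SPEC =====
def Spec_solution (sequence : List Int) (out : Bool) : Prop := out = solution_alt sequence
instance (sequence : List Int) (out : Bool) : Decidable (Spec_solution sequence out) := by unfold Spec_solution; infer_instance

-- ===== CLAIM (what is proved, stated in full; the proofs are below) =====
def Claim_equal_solution : Prop := ∀ (sequence : List Int), Dom_solution sequence → Spec_solution sequence (solution sequence)

-- ===== LEMMAS AND PROOFS =====

theorem solutionInc_iff (xs : List Int) :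
    solutionInc xs = true ↔ List.IsChain (· < ·) xs := by
  induction xs with
  | nil => simp [solutionInc]
  | cons a t ih =>
    cases t with
    | nil => simp [solutionInc]
    | cons b t' =>
      simp only [solutionInc, List.drop_one, List.tail_cons, List.zip_cons_cons,
        List.all_cons, Bool.and_eq_true, decide_eq_true_eq, List.isChain_cons_cons]
      constructor
      · rintro ⟨h1, h2⟩
        exact ⟨h1, (ih).1 (by simpa [solutionInc] using h2)⟩
      · rintro ⟨h1, h2⟩
        exact ⟨h1, by simpa [solutionInc] using (ih).2 h2⟩

theorem dedupAux_nodup (xs : List Int) : ∀ acc : List Int, acc.Nodup →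
    (xs.foldl (fun l x => if l.contains x then l else l ++ [x]) acc).Nodup := by
  induction xs with
  | nil => intro acc h; simpa using h
  | cons a t ih =>
    intro acc h
    simp only [List.foldl_cons]
    by_cases hc : acc.contains a = true
    · rw [if_pos hc]; exact ih acc h
    · rw [if_neg hc]
      have hmem : a ∉ acc := by simpa using hc
      refine ih _ ?_
      simp only [List.nodup_append, h, List.nodup_cons, List.nodup_nil, and_true, true_and]
      refine ⟨by simp, ?_⟩
      intro x hx b hb
      simp only [List.mem_singleton] at hb
      subst hb
      exact fun h' => hmem (h' ▸ hx)

theorem dedupAux_eq (xs : List Int) : ∀ acc : List Int, xs.Nodup → (∀ x ∈ xs, x ∉ acc) →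
    xs.foldl (fun l x => if l.contains x then l else l ++ [x]) acc = acc ++ xs := by
  induction xs with
  | nil => intro acc _ _; simp
  | cons a t ih =>
    intro acc hnd hdisj
    have ha : ¬ acc.contains a = true := by
      simpa using hdisj a (by simp)
    have hnd' : t.Nodup := hnd.of_cons
    have hdisj' : ∀ x ∈ t, x ∉ acc ++ [a] := by
      intro x hx
      simp only [List.mem_append, List.mem_singleton]
      rintro (h | rfl)
      · exact hdisj x (by simp [hx]) h
      · exact (List.nodup_cons.1 hnd).1 hx
    simp only [List.foldl_cons]
    rw [if_neg ha, ih (acc ++ [a]) hnd' hdisj']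
    simp

-- A's per-candidate test is exactly strict increase
theorem check_iff (temp : List Int) :
    ((temp == PySem.List.sorted temp (fun x => x) false) && (temp == solutionDedup temp)) = true ↔
      List.IsChain (· < ·) temp := by
  simp only [Bool.and_eq_true, beq_iff_eq]
  constructor
  · rintro ⟨h1, h2⟩
    have hnd : temp.Nodup := by
      have := dedupAux_nodup temp [] (by simp)
      rw [show temp.foldl (fun l x => if l.contains x then l else l ++ [x]) [] = solutionDedup temp from rfl, ← h2] at this
      exact this
    have hle : temp.Pairwise (· ≤ ·) := by
      have := PySem.List.sorted_pairwise temp (fun x => x)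
      rwa [← h1] at this
    have hlt : temp.Pairwise (· < ·) :=
      (hle.and hnd).imp (fun h => lt_of_le_of_ne h.1 h.2)
    exact hlt.isChain
  · intro hc
    have hlt : temp.Pairwise (· < ·) := List.isChain_iff_pairwise.1 hc
    have hnd : temp.Nodup := hlt.imp (fun h => ne_of_lt h)
    refine ⟨?_, ?_⟩
    · exact (PySem.List.sorted_eq_of_perm_of_pairwise_lt temp temp (fun x => x) (List.Perm.refl temp) hlt).symm
    · have := dedupAux_eq temp [] hnd (by simp)
      simpa [solutionDedup] using this.symm

theorem solution_iff (xs : List Int) :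
    solution xs = true ↔ ∃ i, i < xs.length ∧ List.IsChain (· < ·) (xs.eraseIdx i) := by
  simp only [solution, List.any_eq_true, List.mem_range]
  constructor
  · rintro ⟨i, hi, h⟩
    exact ⟨i, hi, (check_iff _).1 h⟩
  · rintro ⟨i, hi, h⟩
    exact ⟨i, hi, (check_iff _).2 h⟩

-- a violating adjacent pair survives any removal away from it
theorem no_chain_erase (xs : List Int) (j i : ℕ) (hj : j + 1 < xs.length)
    (hv : xs[j + 1] ≤ xs[j]) (hi : i < xs.length) (hij : i ≠ j) (hij1 : i ≠ j + 1) :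
    ¬ List.IsChain (· < ·) (xs.eraseIdx i) := by
  intro hc
  rw [List.isChain_iff_getElem] at hc
  have hlen : (xs.eraseIdx i).length = xs.length - 1 := by
    simp [List.length_eraseIdx, hi]
  rcases Nat.lt_or_ge i j with hlt | hge
  · -- i < j: pair at positions j-1, j in the erased list
    have hb : (j - 1) + 1 < (xs.eraseIdx i).length := by omega
    have := hc (j - 1) hb
    rw [List.getElem_eraseIdx, List.getElem_eraseIdx] at this
    rw [dif_neg (by omega), dif_neg (by omega)] at this
    have he1 : j - 1 + 1 = j := by omega
    simp only [he1] at this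
    exact absurd this (by exact not_lt.2 hv)
  · -- i ≥ j and i ≠ j, j+1 so i > j+1: pair stays at positions j, j+1
    have hgt : j + 1 < i := by omega
    have hb : j + 1 < (xs.eraseIdx i).length := by omega
    have := hc j hb
    rw [List.getElem_eraseIdx, List.getElem_eraseIdx] at this
    rw [dif_pos (by omega), dif_pos (by omega)] at this
    exact absurd this (not_lt.2 hv)

theorem solution_eq_alt (xs : List Int) : solution xs = solution_alt xs := by
  unfold solution_alt
  by_cases h0 : xs.length = 0
  · have : xs = [] := List.length_eq_zero_iff.1 h0
    subst this
    simp [solution]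
  · simp only [if_neg h0]
    cases hf : (List.range (xs.length - 1)).find?
        (fun k => decide (xs.getD (k + 1) 0 ≤ xs.getD k 0)) with
    | none =>
      -- no violation: xs is strictly increasing, removing index 0 works
      have hall : ∀ (k : ℕ) (_hk : k + 1 < xs.length), xs[k] < xs[k + 1] := by
        intro k hk
        have := List.find?_eq_none.1 hf k (List.mem_range.2 (by omega))
        simp only [decide_eq_true_eq] at this
        rw [List.getD_eq_getElem xs 0 hk,
          List.getD_eq_getElem xs 0 (show k < xs.length by omega)] at this
        omega
      have hchain : List.IsChain (· < ·) xs := List.isChain_iff_getElem.2 hall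
      have : solution xs = true := (solution_iff xs).2
        ⟨0, by omega, by rw [List.eraseIdx_zero]; exact hchain.tail⟩
      simp [this]
    | some j =>
      have hjmem := List.mem_range.1 (List.mem_of_find?_eq_some hf)
      have hj1 : j + 1 < xs.length := by omega
      have hpj := List.find?_some hf
      simp only [decide_eq_true_eq] at hpj
      rw [List.getD_eq_getElem xs 0 hj1, List.getD_eq_getElem xs 0 (by omega)] at hpj
      show solution xs =
        (solutionInc (List.take j xs ++ List.drop (j + 1) xs) ||
         solutionInc (List.take (j + 1) xs ++ List.drop (j + 2) xs))
      rw [show List.take j xs ++ List.drop (j + 1) xs = xs.eraseIdx j from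
            (List.eraseIdx_eq_take_drop_succ xs j).symm,
          show List.take (j + 1) xs ++ List.drop (j + 2) xs = xs.eraseIdx (j + 1) from
            (List.eraseIdx_eq_take_drop_succ xs (j + 1)).symm]
      rw [Bool.eq_iff_iff, solution_iff, Bool.or_eq_true, solutionInc_iff, solutionInc_iff]
      constructor
      · rintro ⟨i, hi, hc⟩
        by_cases h1 : i = j
        · subst h1; exact Or.inl hc
        by_cases h2 : i = j + 1
        · subst h2; exact Or.inr hc
        exact absurd hc (no_chain_erase xs j i hj1 hpj hi h1 h2)
      · rintro (h | h)
        · exact ⟨j, by omega, h⟩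
        · exact ⟨j + 1, hj1, h⟩

-- ===== VERDICT (by name: the statement is the Claim_ definition above) =====
theorem solution_spec : Claim_equal_solution := by
  intro sequence _
  unfold Spec_solution
  exact solution_eq_alt sequence
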